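-- pv_equiv track=rewrite | github.com/okrupa/checkers | checkers.py | control_num_moves
-- ===== SOURCE A (Python) =====
-- def control_num_moves(old_board, board, num_moves):
--     # sprawdzenie czy wykonano zbicie
--     old_pawns = []
--     new_pawns = []
--     for row_a in old_board:
--         for a in row_a:
--             old_pawns.append(a)
--     for row_b in board:
--         for b in row_b:
--             new_pawns.append(b)
--     old_pawns.sort()
--     new_pawns.sort()
--     if old_pawns == new_pawns:
--         num_moves +=1
--         return num_moves
--     return 0
-- ===== SOURCE B (Python) =====
-- def _tally(xs):
--     c = {}
--     for x in xs:
--         c[x] = c.get(x, 0) + 1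
--     return c
--
--
-- def control_num_moves(old_board, board, num_moves):
--     old = [a for row in old_board for a in row]
--     new = [b for row in board for b in row]
--     return num_moves + 1 if _tally(old) == _tally(new) else 0
-- ===== Notes on version B (the rewrite author's own statement) =====
-- stated objective: idiomatic
-- what changed: B flattens with comprehensions and compares frequency dictionaries (Counter-style hash counting) instead of sorting both flattened lists and comparing them elementwise.
import Mathlib
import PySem

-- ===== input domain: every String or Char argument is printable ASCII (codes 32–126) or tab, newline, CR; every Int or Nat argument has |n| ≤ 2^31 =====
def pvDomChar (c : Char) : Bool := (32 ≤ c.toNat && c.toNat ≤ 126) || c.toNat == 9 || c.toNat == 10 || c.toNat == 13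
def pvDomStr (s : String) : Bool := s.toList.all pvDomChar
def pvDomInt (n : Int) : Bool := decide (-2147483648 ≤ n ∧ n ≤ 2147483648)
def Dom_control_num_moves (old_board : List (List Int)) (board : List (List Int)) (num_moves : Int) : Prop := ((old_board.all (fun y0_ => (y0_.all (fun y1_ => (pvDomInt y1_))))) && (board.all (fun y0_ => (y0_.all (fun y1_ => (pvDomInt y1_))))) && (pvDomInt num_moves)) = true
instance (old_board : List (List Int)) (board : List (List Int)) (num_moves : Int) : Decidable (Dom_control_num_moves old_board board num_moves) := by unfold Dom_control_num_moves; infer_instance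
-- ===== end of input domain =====

-- B compares frequency dictionaries of the flattened boards instead of sorting both
-- flattened lists and comparing them elementwise (idiomatic Counter-style rewrite).

-- ===== PORT A =====
def control_num_moves (old_board : List (List Int)) (board : List (List Int)) (num_moves : Int) : Int :=
  let old_pawns := old_board.foldl (fun acc row_a => row_a.foldl (fun acc a => acc ++ [a]) acc) []
  let new_pawns := board.foldl (fun acc row_b => row_b.foldl (fun acc b => acc ++ [b]) acc) []
  let old_sorted : List Int := PySem.List.sorted old_pawns (fun x => x) false
  let new_sorted : List Int := PySem.List.sorted new_pawns (fun x => x) false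
  if old_sorted = new_sorted then num_moves + 1 else 0

-- ===== PORT B =====
-- Source B's _tally loop 'c[x] = c.get(x, 0) + 1' is exactly PySem.Dict.counter (counter_eq_foldl).
-- Python's dict == ignores insertion order: ported as mutual key containment with equal values.
def pyDictEq (d1 d2 : PySem.Dict Int Int) : Bool :=
  d1.keys.all (fun k => d2.getD k 0 == d1.getD k 0) &&
  d2.keys.all (fun k => d1.getD k 0 == d2.getD k 0)

def control_num_moves_alt (old_board : List (List Int)) (board : List (List Int)) (num_moves : Int) : Int :=
  let old := old_board.flatMap (fun row => row)
  let new := board.flatMap (fun row => row)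
  if pyDictEq (PySem.Dict.counter old) (PySem.Dict.counter new) then num_moves + 1 else 0

-- ===== PRECONDITION & SPEC =====
def Spec_control_num_moves (old_board : List (List Int)) (board : List (List Int)) (num_moves : Int) (out : Int) : Prop := out = control_num_moves_alt old_board board num_moves
instance (old_board : List (List Int)) (board : List (List Int)) (num_moves : Int) (out : Int) : Decidable (Spec_control_num_moves old_board board num_moves out) := by unfold Spec_control_num_moves; infer_instance

-- ===== CLAIM (what is proved, stated in full; the proofs are below) =====
def Claim_equal_control_num_moves : Prop := ∀ (old_board : List (List Int)) (board : List (List Int)) (num_moves : Int), Dom_control_num_moves old_board board num_moves → Spec_control_num_moves old_board board num_moves (control_num_moves old_board board num_moves)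

-- ===== LEMMAS AND PROOFS =====

-- A's nested append loop builds exactly the flattened board.
theorem flatten_eq (bs : List (List Int)) (acc : List Int) :
    bs.foldl (fun acc row => row.foldl (fun acc a => acc ++ [a]) acc) acc
      = acc ++ bs.flatMap (fun row => row) := by
  induction bs generalizing acc with
  | nil => simp
  | cons r t ih =>
    rw [List.foldl_cons, ih, PySem.List.foldl_append_singleton]
    simp

-- B's dict equality on counters says exactly "same multiset".
theorem pyDictEq_counter_iff (o n : List Int) :
    pyDictEq (PySem.Dict.counter o) (PySem.Dict.counter n) = true ↔ o.Perm n := by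
  unfold pyDictEq
  simp only [Bool.and_eq_true, List.all_eq_true, PySem.Dict.keys_counter,
    PySem.Dict.getD_counter, PySem.Set.mem_ofList, beq_iff_eq]
  constructor
  · rintro ⟨h1, h2⟩
    rw [List.perm_iff_count]
    intro v
    by_cases hvo : v ∈ o
    · exact_mod_cast (h1 v hvo).symm
    · by_cases hvn : v ∈ n
      · exact_mod_cast h2 v hvn
      · simp [List.count_eq_zero_of_not_mem, hvo, hvn]
  · intro hp
    have hc := List.perm_iff_count.mp hp
    exact ⟨fun k _ => by exact_mod_cast (hc k).symm, fun k _ => by exact_mod_cast hc k⟩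

-- ===== VERDICT (by name: the statement is the Claim_ definition above) =====
theorem control_num_moves_spec : Claim_equal_control_num_moves := by
  intro old_board board num_moves _
  unfold Spec_control_num_moves control_num_moves control_num_moves_alt
  rw [flatten_eq, flatten_eq, List.nil_append, List.nil_append]
  by_cases hp : (old_board.flatMap (fun row => row)).Perm (board.flatMap (fun row => row))
  · rw [if_pos ((pyDictEq_counter_iff _ _).mpr hp),
      if_pos ((PySem.List.sorted_id_eq_sorted_id_iff_perm _ _).mpr hp)]
  · rw [if_neg (fun h => hp ((pyDictEq_counter_iff _ _).mp h)),
      if_neg (fun h => hp ((PySem.List.sorted_id_eq_sorted_id_iff_perm _ _).mp h))]
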